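-- pv_equiv track=rewrite | github.com/jaki2012/IdentifierSplitting-SEKE2018 | is_inference.py | splitting_by_tags
-- ===== SOURCE A (Python) =====
-- def splitting_by_tags(identi, tags):
-- 	split_pos = [-1]
-- 	terms = []
-- 	# The spare N will be ignore
-- 	for i in range(len(identi)-1):
-- 		if(tags[i]=='E' and tags[i+1]=='B'):
-- 			split_pos.append(i)
-- 		elif tags[i]=='E' and tags[i+1]=='S':
-- 			split_pos.append(i)
-- 		elif tags[i]=='S' and tags[i+1]=='B':
-- 			split_pos.append(i)
-- 		elif tags[i]=='S' and tags[i+1]=='S':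
-- 			split_pos.append(i)
-- 	split_pos.append(len(identi)-1)
-- 	for i in range(len(split_pos)-1):
-- 		term = identi[split_pos[i]+1:split_pos[i+1]+1]
-- 		if(term is not '-'):
-- 			terms.append(term)
--
-- 	return terms
-- ===== SOURCE B (Python) =====
-- def splitting_by_tags(identi, tags):
-- 	terms = []
-- 	start = 0
-- 	for i in range(len(identi) - 1):
-- 		if tags[i] in ('E', 'S') and tags[i + 1] in ('B', 'S'):
-- 			term = identi[start:i + 1]
-- 			if term != '-':
-- 				terms.append(term)
-- 			start = i + 1
-- 	term = identi[start:]
-- 	if term != '-':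
-- 		terms.append(term)
-- 	return terms
-- ===== Notes on version B (the rewrite author's own statement) =====
-- stated objective: simpler
-- what changed: B makes a single pass with a running start index, slicing and filtering each term at the boundary where it ends, instead of A's two phases that first build a split_pos index table and then re-scan it slicing identi by table lookups; B also writes the filter as term != '-' (A's `term is not '-'` fires exactly on the cached 1-char string '-').
import Mathlib
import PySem

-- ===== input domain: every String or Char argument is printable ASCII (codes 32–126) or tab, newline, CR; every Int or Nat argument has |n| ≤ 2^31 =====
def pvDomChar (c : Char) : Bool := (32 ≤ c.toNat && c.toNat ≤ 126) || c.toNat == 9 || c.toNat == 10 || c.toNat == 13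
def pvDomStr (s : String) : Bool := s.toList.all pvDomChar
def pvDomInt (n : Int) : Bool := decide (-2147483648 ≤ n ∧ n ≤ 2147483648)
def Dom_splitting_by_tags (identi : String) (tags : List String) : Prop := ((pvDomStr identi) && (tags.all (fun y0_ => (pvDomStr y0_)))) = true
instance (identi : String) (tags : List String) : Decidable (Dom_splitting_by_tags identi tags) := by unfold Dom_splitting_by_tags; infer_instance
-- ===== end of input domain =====

-- B replaces A's split-position table and second index/slicing pass by a single pass with a running
-- start index (objective: simpler); return values agree on all inputs where Python A returns.


-- ===== PORT A =====
-- `term is not '-'` on a fresh CPython slice is False exactly for the cached 1-char string "-",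
-- so the guard is ported as `term ≠ "-"`.
def splitting_by_tags (identi : String) (tags : List String) : List String :=
  let split_pos : List Int :=
    (PySem.List.pyRange 0 (PySem.Str.len identi - 1) 1).foldl (fun sp i =>
      if PySem.List.pyGetD tags i "" == "E" && PySem.List.pyGetD tags (i+1) "" == "B" then sp ++ [i]
      else if PySem.List.pyGetD tags i "" == "E" && PySem.List.pyGetD tags (i+1) "" == "S" then sp ++ [i]
      else if PySem.List.pyGetD tags i "" == "S" && PySem.List.pyGetD tags (i+1) "" == "B" then sp ++ [i]
      else if PySem.List.pyGetD tags i "" == "S" && PySem.List.pyGetD tags (i+1) "" == "S" then sp ++ [i]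
      else sp) [(-1 : Int)]
  let split_pos := split_pos ++ [PySem.Str.len identi - 1]
  (PySem.List.pyRange 0 ((split_pos.length : Int) - 1) 1).foldl (fun terms i =>
    let term := PySem.Str.slice identi (some (PySem.List.pyGetD split_pos i 0 + 1))
                  (some (PySem.List.pyGetD split_pos (i+1) 0 + 1))
    if !(term == "-") then terms ++ [term] else terms) []


-- ===== PORT B =====
def splitting_by_tags_alt (identi : String) (tags : List String) : List String :=
  let st :=
    (PySem.List.pyRange 0 (PySem.Str.len identi - 1) 1).foldl (fun (st : List String × Int) i =>
      if (PySem.List.pyGetD tags i "" == "E" || PySem.List.pyGetD tags i "" == "S") &&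
         (PySem.List.pyGetD tags (i+1) "" == "B" || PySem.List.pyGetD tags (i+1) "" == "S") then
        let term := PySem.Str.slice identi (some st.2) (some (i+1))
        (if !(term == "-") then st.1 ++ [term] else st.1, i+1)
      else st) ([], 0)
  let term := PySem.Str.slice identi (some st.2) none
  if !(term == "-") then st.1 ++ [term] else st.1


-- ===== PRECONDITION & SPEC =====
-- A (and B identically) raises IndexError when tags is shorter than identi — except that when
-- len(tags) = len(identi)-1 and the last tag is not 'E'/'S' the final tags[i+1] access is
-- short-circuited away; Pre_ admits exactly the inputs where Python A returns.
def Pre_splitting_by_tags (identi : String) (tags : List String) : Prop :=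
  PySem.Str.len identi ≤ 1 ∨ PySem.Str.len identi ≤ (tags.length : Int) ∨
    ((tags.length : Int) = PySem.Str.len identi - 1 ∧
      tags.getLast? ≠ some "E" ∧ tags.getLast? ≠ some "S")
instance (identi : String) (tags : List String) : Decidable (Pre_splitting_by_tags identi tags) := by
  unfold Pre_splitting_by_tags; infer_instance

def pvWitness_splitting_by_tags : String × List String :=
  ("catDog", ["B", "M", "E", "B", "M", "E"])

def Spec_splitting_by_tags (identi : String) (tags : List String) (out : List String) : Prop := out = splitting_by_tags_alt identi tags
instance (identi : String) (tags : List String) (out : List String) : Decidable (Spec_splitting_by_tags identi tags out) := by unfold Spec_splitting_by_tags; infer_instance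

-- ===== CLAIM (what is proved, stated in full; the proofs are below) =====
def Claim_equal_splitting_by_tags : Prop := ∀ (identi : String) (tags : List String), Dom_splitting_by_tags identi tags → Pre_splitting_by_tags identi tags → Spec_splitting_by_tags identi tags (splitting_by_tags identi tags)

-- ===== LEMMAS AND PROOFS =====

def pvSeg (identi : String) (p q : Int) : List String :=
  let t := PySem.Str.slice identi (some (p + 1)) (some (q + 1))
  if !(t == "-") then [t] else []

def pvSegs (identi : String) : Int → List Int → List String
  | _, [] => []
  | prev, p :: ps => pvSeg identi prev p ++ pvSegs identi p ps

lemma pv_if_append (terms : List String) (t : String) :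
    (if !(t == "-") then terms ++ [t] else terms)
      = terms ++ (if !(t == "-") then [t] else []) := by
  split <;> simp

lemma pv_combine (e s b t : Bool) {α : Type} (sp x : α) :
    (if e && b then x else if e && t then x else if s && b then x
      else if s && t then x else sp)
      = (if (e || s) && (b || t) then x else sp) := by
  cases e <;> cases s <;> cases b <;> cases t <;> simp

lemma pvSegs_append (identi : String) (l : List Int) : ∀ (prev q : Int),
    pvSegs identi prev (l ++ [q]) = pvSegs identi prev l ++ pvSeg identi (l.getLastD prev) q := by
  induction l with
  | nil => intro prev q; simp [pvSegs]
  | cons x l ih =>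
    intro prev q
    rw [List.getLastD_cons]
    simp [pvSegs, ih x q]

lemma pvAloop2 (identi : String) :
    ∀ (tl : List Int) (a : Int) (acc : List String),
    (List.range tl.length).foldl
      (fun terms k => terms ++ pvSeg identi ((a :: tl).getD k 0) ((a :: tl).getD (k+1) 0)) acc
      = acc ++ pvSegs identi a tl := by
  intro tl
  induction tl with
  | nil => intro a acc; simp [pvSegs]
  | cons b tl ih =>
    intro a acc
    rw [show (b :: tl).length = tl.length + 1 from rfl, List.range_succ_eq_map,
        List.foldl_cons, List.foldl_map]
    simp only [List.getD_cons_zero, List.getD_cons_succ, Nat.succ_eq_add_one]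
    have h2 := ih b (acc ++ pvSeg identi a b)
    simp only [List.getD_cons_succ] at h2
    rw [h2]
    simp [pvSegs]

lemma pvBloop (identi : String) (c : Int → Bool) :
    ∀ (ys : List Int) (acc : List String) (prev : Int),
    ys.foldl (fun st i => if c i then (st.1 ++ pvSeg identi (st.2 - 1) i, i + 1) else st) (acc, prev + 1)
      = (acc ++ pvSegs identi prev (ys.filter c), ((ys.filter c).getLastD prev) + 1) := by
  intro ys
  induction ys with
  | nil => intro acc prev; simp [pvSegs]
  | cons y ys ih =>
    intro acc prev
    rw [List.foldl_cons]
    by_cases hc : c y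
    · simp only [hc, if_pos, add_sub_cancel_right]
      rw [ih (acc ++ pvSeg identi prev y) y,
          show List.filter c (y :: ys) = y :: List.filter c ys by simp [hc],
          List.getLastD_cons]
      simp [pvSegs]
    · rw [if_neg (by simp [hc]), ih acc prev,
          show List.filter c (y :: ys) = List.filter c ys by simp [hc]]

lemma pv_slice_to_end (identi : String) (a : Int) (h : 0 ≤ a) :
    PySem.Str.slice identi (some a) (some (PySem.Str.len identi)) =
      PySem.Str.slice identi (some a) none := by
  simp only [PySem.Str.slice, PySem.Chars.slice, PySem.Str.len_eq]
  congr 1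
  rw [PySem.List.slice_toNat _ h (by positivity), PySem.List.slice_from _ h]
  exact List.take_of_length_le (by simp)

lemma pv_getLastD_mem_nonneg : ∀ (l : List Int) (d : Int), -1 ≤ d →
    (∀ x ∈ l, 0 ≤ x) → -1 ≤ l.getLastD d := by
  intro l
  induction l with
  | nil => intro d hd _; simpa using hd
  | cons a l ih =>
    intro d _ h
    rw [List.getLastD_cons]
    exact ih a (by linarith [h a (by simp)]) (fun x hx => h x (by simp [hx]))

lemma pv_main (identi : String) (tags : List String) :
    splitting_by_tags identi tags = splitting_by_tags_alt identi tags := by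
  unfold splitting_by_tags splitting_by_tags_alt
  dsimp only
  set n := PySem.Str.len identi with hn
  set c : Int → Bool := fun i =>
    (PySem.List.pyGetD tags i "" == "E" || PySem.List.pyGetD tags i "" == "S") &&
    (PySem.List.pyGetD tags (i+1) "" == "B" || PySem.List.pyGetD tags (i+1) "" == "S") with hc
  set bs : List Int := (PySem.List.pyRange 0 (n - 1) 1).filter c with hbs
  -- A's first loop builds -1 :: bs
  have hA1 : (PySem.List.pyRange 0 (n - 1) 1).foldl (fun sp i =>
      if PySem.List.pyGetD tags i "" == "E" && PySem.List.pyGetD tags (i+1) "" == "B" then sp ++ [i]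
      else if PySem.List.pyGetD tags i "" == "E" && PySem.List.pyGetD tags (i+1) "" == "S" then sp ++ [i]
      else if PySem.List.pyGetD tags i "" == "S" && PySem.List.pyGetD tags (i+1) "" == "B" then sp ++ [i]
      else if PySem.List.pyGetD tags i "" == "S" && PySem.List.pyGetD tags (i+1) "" == "S" then sp ++ [i]
      else sp) [(-1 : Int)] = -1 :: bs := by
    rw [PySem.List.foldl_congr_mem _ _ (fun sp i => if c i then sp ++ [i] else sp) _
        (fun acc x _ => pv_combine _ _ _ _ acc (acc ++ [x]))]
    rw [show (fun (sp : List Int) (i : Int) => if c i then sp ++ [i] else sp)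
          = (fun sp i => if c i then sp ++ [id i] else sp) from rfl]
    rw [PySem.List.foldl_append_if c id _ [(-1 : Int)]]
    simp [hbs]
  rw [hA1]
  -- canonicalize B's loop body
  have hBc : (PySem.List.pyRange 0 (n - 1) 1).foldl (fun (st : List String × Int) i =>
      if (PySem.List.pyGetD tags i "" == "E" || PySem.List.pyGetD tags i "" == "S") &&
         (PySem.List.pyGetD tags (i+1) "" == "B" || PySem.List.pyGetD tags (i+1) "" == "S") then
        (if !(PySem.Str.slice identi (some st.2) (some (i+1)) == "-")
          then st.1 ++ [PySem.Str.slice identi (some st.2) (some (i+1))] else st.1, i + 1)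
      else st) ([], 0)
      = (pvSegs identi (-1) bs, bs.getLastD (-1) + 1) := by
    rw [PySem.List.foldl_congr_mem _ _
        (fun (st : List String × Int) i => if c i then (st.1 ++ pvSeg identi (st.2 - 1) i, i + 1) else st) _
        ?_]
    · have hB := pvBloop identi c (PySem.List.pyRange 0 (n - 1) 1) [] (-1)
      rw [show ((-1 : Int) + 1) = 0 from by norm_num] at hB
      rw [hB, ← hbs]
      simp
    · intro st i _
      dsimp only
      by_cases h : c i
      · have h2 : ((PySem.List.pyGetD tags i "" == "E" || PySem.List.pyGetD tags i "" == "S") &&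
            (PySem.List.pyGetD tags (i+1) "" == "B" || PySem.List.pyGetD tags (i+1) "" == "S")) = true := h
        rw [if_pos h2, if_pos h]
        simp only [pvSeg, sub_add_cancel, Prod.mk.injEq, and_true]
        split <;> simp
      · have h2 : ¬ (((PySem.List.pyGetD tags i "" == "E" || PySem.List.pyGetD tags i "" == "S") &&
            (PySem.List.pyGetD tags (i+1) "" == "B" || PySem.List.pyGetD tags (i+1) "" == "S")) = true) := h
        rw [if_neg h2, if_neg h]
  rw [hBc, List.cons_append]
  -- canonicalize A's second loop
  have hlen : (((-1 : Int) :: (bs ++ [n - 1])).length : Int) - 1 = ((bs ++ [n - 1]).length : Int) := by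
    simp
  rw [hlen, PySem.List.pyRange_zero_natCast, List.foldl_map]
  rw [PySem.List.foldl_congr_mem _ _
      (fun terms k => terms ++ pvSeg identi (((-1 : Int) :: (bs ++ [n - 1])).getD k 0)
        (((-1 : Int) :: (bs ++ [n - 1])).getD (k+1) 0)) _ ?_]
  · rw [pvAloop2 identi (bs ++ [n - 1]) (-1) [], List.nil_append,
        pvSegs_append identi bs (-1) (n - 1)]
    -- remaining: final segment equality
    dsimp only
    have hxnn : ∀ x ∈ bs, (0 : Int) ≤ x := by
      intro x hx
      have hx' : x ∈ (PySem.List.pyRange 0 (n - 1) 1).filter c := hbs ▸ hx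
      exact (PySem.List.mem_pyRange_one.mp (List.mem_filter.mp hx').1).1
    have hnn : (0 : Int) ≤ bs.getLastD (-1) + 1 := by
      have := pv_getLastD_mem_nonneg bs (-1) le_rfl hxnn
      linarith
    have hsl : PySem.Str.slice identi (some (bs.getLastD (-1) + 1)) (some (n - 1 + 1))
        = PySem.Str.slice identi (some (bs.getLastD (-1) + 1)) none := by
      rw [show (n - 1 + 1) = n from by ring, hn]
      exact pv_slice_to_end identi _ hnn
    have hseg : pvSeg identi (bs.getLastD (-1)) (n - 1)
        = (if !(PySem.Str.slice identi (some (bs.getLastD (-1) + 1)) none == "-")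
            then [PySem.Str.slice identi (some (bs.getLastD (-1) + 1)) none] else []) := by
      simp only [pvSeg, hsl]
    rw [pv_if_append, hseg]
  · intro terms k _
    have e1 : PySem.List.pyGetD ((-1 : Int) :: (bs ++ [n - 1])) (↑k) 0
        = ((-1 : Int) :: (bs ++ [n - 1])).getD k 0 := PySem.List.pyGetD_natCast _ _ _
    have e2 : PySem.List.pyGetD ((-1 : Int) :: (bs ++ [n - 1])) ((↑k) + 1) 0
        = ((-1 : Int) :: (bs ++ [n - 1])).getD (k + 1) 0 := by
      rw [show ((k : Int) + 1) = ((k + 1 : Nat) : Int) by push_cast; ring]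
      exact PySem.List.pyGetD_natCast _ _ _
    rw [e1, e2, pv_if_append]
    rfl

-- ===== VERDICT (by name: the statement is the Claim_ definition above) =====
theorem splitting_by_tags_spec : Claim_equal_splitting_by_tags := by
  intro identi tags _ _
  unfold Spec_splitting_by_tags
  exact pv_main identi tags
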